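-- pv_equiv track=rewrite | github.com/pkovalev/advent-of-code-2025 | Day3.py | biggest_and_pos
-- ===== SOURCE A (Python) =====
-- def biggest_and_pos(line, start, end):
--     biggest = -1
--     pos = -1
--     for i in range(start, end):
--         if int(line[i]) > biggest:
--             pos = i
--             biggest = int(line[i])
--     return (biggest, pos)
-- ===== SOURCE B (Python) =====
-- def biggest_and_pos(line, start, end):
--     # Two separate passes: first the maximum digit, then the first index attaining it.
--     if start >= end:
--         return (-1, -1)
--     biggest = max(int(line[i]) for i in range(start, end))
--     pos = next(i for i in range(start, end) if int(line[i]) == biggest)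
--     return (biggest, pos)
-- ===== Notes on version B (the rewrite author's own statement) =====
-- stated objective: simpler
-- what changed: A's single fused scan with two pieces of mutable loop state is split into two independent passes: a max() over the digits and a next() scan for the first index attaining that maximum, with the empty range handled by an explicit guard returning (-1,-1).
import Mathlib
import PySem

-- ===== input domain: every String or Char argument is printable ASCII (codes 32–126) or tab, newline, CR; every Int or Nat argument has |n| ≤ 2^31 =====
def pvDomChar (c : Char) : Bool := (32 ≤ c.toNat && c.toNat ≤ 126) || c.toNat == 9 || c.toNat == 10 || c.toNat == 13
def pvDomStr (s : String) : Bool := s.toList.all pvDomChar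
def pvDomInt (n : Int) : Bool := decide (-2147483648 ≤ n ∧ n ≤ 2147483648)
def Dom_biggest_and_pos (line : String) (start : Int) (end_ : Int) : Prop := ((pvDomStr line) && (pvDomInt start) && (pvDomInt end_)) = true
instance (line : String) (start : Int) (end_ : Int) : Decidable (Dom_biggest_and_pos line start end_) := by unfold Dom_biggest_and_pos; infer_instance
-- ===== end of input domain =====

-- B replaces A's single fused scan (mutable running max + position) by two independent
-- passes — a max over the digits, then a first-index search — for a simpler decomposition.


-- int(line[i]) for one character: exact for digit characters (the only case Pre_ admits);
-- on an out-of-range index (IndexError) or a non-digit character (ValueError) Python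
-- raises, so those inputs are outside Pre_ and the -1 here is never relied upon.
def pyIntAt (line : String) (i : Int) : Int :=
  match PySem.Str.pyGet? line i with
  | some c => if c.isDigit then (c.toNat : Int) - 48 else -1
  | none => -1

-- ===== PORT A =====
def biggest_and_pos (line : String) (start : Int) (end_ : Int) : Int × Int :=
  (PySem.List.pyRange start end_ 1).foldl
    (fun s i => if pyIntAt line i > s.1 then (pyIntAt line i, i) else s)
    (-1, -1)

-- ===== PORT B =====
def biggest_and_pos_alt (line : String) (start : Int) (end_ : Int) : Int × Int :=
  if start ≥ end_ then (-1, -1)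
  else
    -- max(...) : the range is nonempty here, so .getD (-1) is never the empty-max case
    let biggest : Int :=
      (PySem.List.max? ((PySem.List.pyRange start end_ 1).map (pyIntAt line)) (fun y => y)).getD (-1)
    -- next(...) : biggest is attained in the range, so find? succeeds and .getD (-1) is unused
    let pos : Int :=
      ((PySem.List.pyRange start end_ 1).find? (fun i => pyIntAt line i == biggest)).getD (-1)
    (biggest, pos)

-- ===== PRECONDITION & SPEC =====
-- Pre_: every index of the range hits a digit character (possibly via Python's negative-index
-- wrap); otherwise int(line[i]) raises ValueError or line[i] raises IndexError in A.
-- (the two bound conjuncts are forced: every index the loop touches must be in wrap range,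
-- so they exclude nothing A returns on; they also keep the quantified range small)
def Pre_biggest_and_pos (line : String) (start : Int) (end_ : Int) : Prop :=
  end_ ≤ start ∨
    (-(PySem.Str.len line) ≤ start ∧ end_ ≤ PySem.Str.len line ∧
      ∀ i ∈ PySem.List.pyRange (max start (-(PySem.Str.len line))) (min end_ (PySem.Str.len line)) 1,
        (PySem.Str.pyGet? line i).any Char.isDigit = true)
instance (line : String) (start : Int) (end_ : Int) : Decidable (Pre_biggest_and_pos line start end_) := by unfold Pre_biggest_and_pos; infer_instance
def pvWitness_biggest_and_pos : String × Int × Int := ("3971", 1, 4)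

def Spec_biggest_and_pos (line : String) (start : Int) (end_ : Int) (out : Int × Int) : Prop := out = biggest_and_pos_alt line start end_
instance (line : String) (start : Int) (end_ : Int) (out : Int × Int) : Decidable (Spec_biggest_and_pos line start end_ out) := by unfold Spec_biggest_and_pos; infer_instance

-- ===== CLAIM (what is proved, stated in full; the proofs are below) =====
def Claim_equal_biggest_and_pos : Prop := ∀ (line : String) (start : Int) (end_ : Int), Dom_biggest_and_pos line start end_ → Pre_biggest_and_pos line start end_ → Spec_biggest_and_pos line start end_ (biggest_and_pos line start end_)

-- ===== LEMMAS AND PROOFS =====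

theorem pvWitness_ok :
    Dom_biggest_and_pos pvWitness_biggest_and_pos.1 pvWitness_biggest_and_pos.2.1 pvWitness_biggest_and_pos.2.2 ∧
    Pre_biggest_and_pos pvWitness_biggest_and_pos.1 pvWitness_biggest_and_pos.2.1 pvWitness_biggest_and_pos.2.2 := by
  constructor <;> decide

theorem foldl_max_mem (l : List Int) : ∀ a : Int, l.foldl max a = a ∨ l.foldl max a ∈ l := by
  induction l with
  | nil => intro a; left; rfl
  | cons x t ih =>
    intro a
    rcases ih (max a x) with h | h
    · rcases le_total a x with hax | hxa
      · right
        have hx : max a x = x := by omega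
        rw [hx] at h
        simp only [List.foldl_cons, hx, h]
        exact List.mem_cons_self
      · left; simp only [List.foldl_cons, h]; omega
    · right; simp only [List.foldl_cons]; exact List.mem_cons_of_mem _ h

-- characterisation of A's fused loop: its result is the running max together with the
-- first index attaining it (when some value beats the initial bound b).
theorem foldA_char (v : Int → Int) (l : List Int) : ∀ b p : Int,
    l.foldl (fun s i => if v i > s.1 then (v i, i) else s) (b, p) =
      (if b < (l.map v).foldl max b
       then ((l.map v).foldl max b, (l.find? (fun i => v i == (l.map v).foldl max b)).getD p)
       else (b, p)) := by
  induction l with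
  | nil => intro b p; simp
  | cons x t ih =>
    intro b p
    simp only [List.foldl_cons, List.map_cons, List.find?_cons]
    by_cases hc : b < v x
    · rw [if_pos (by exact hc : v x > b)]
      rw [ih (v x) x]
      have hmax : max b (v x) = v x := by omega
      rw [hmax]
      have hle : v x ≤ (t.map v).foldl max (v x) := (PySem.List.le_foldl_max _ _).1
      rw [if_pos (by omega : b < (t.map v).foldl max (v x))]
      by_cases heq : v x = (t.map v).foldl max (v x)
      · rw [if_neg (by omega : ¬ v x < (t.map v).foldl max (v x))]
        rw [← heq]
        simp
      · rw [if_pos (by omega : v x < (t.map v).foldl max (v x))]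
        have hbeq : (v x == (t.map v).foldl max (v x)) = false := by
          refine beq_eq_false_iff_ne.mpr ?_; omega
        rw [hbeq]
        -- the max is attained in t, so find? succeeds and the default is irrelevant
        have hmem : (t.map v).foldl max (v x) ∈ t.map v := by
          rcases foldl_max_mem (t.map v) (v x) with h | h
          · omega
          · exact h
        obtain ⟨j, hj, hvj⟩ := List.mem_map.mp hmem
        have hsome : (t.find? (fun i => v i == (t.map v).foldl max (v x))).isSome := by
          rw [List.find?_isSome]
          exact ⟨j, hj, by simp [hvj]⟩
        obtain ⟨r, hr⟩ := Option.isSome_iff_exists.mp hsome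
        rw [hr]
        rfl
    · rw [if_neg (by omega : ¬ v x > b)]
      rw [ih b p]
      have hmax : max b (v x) = b := by omega
      rw [hmax]
      by_cases hb : b < (t.map v).foldl max b
      · rw [if_pos hb, if_pos hb]
        have hbeq : (v x == (t.map v).foldl max b) = false := by
          refine beq_eq_false_iff_ne.mpr ?_; omega
        rw [hbeq]
      · rw [if_neg hb, if_neg hb]

theorem pyIntAt_nonneg (line : String) (i : Int)
    (h : (PySem.Str.pyGet? line i).any Char.isDigit = true) : 0 ≤ pyIntAt line i := by
  unfold pyIntAt
  cases hg : PySem.Str.pyGet? line i with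
  | none => rw [hg] at h; simp at h
  | some c =>
    rw [hg] at h
    simp only [Option.any_some] at h
    have hb : 48 ≤ c.toNat ∧ c.toNat ≤ 57 := by
      have h' := h
      simp [Char.isDigit] at h'
      exact ⟨h'.1, h'.2⟩
    show 0 ≤ if c.isDigit = true then ((c.toNat : Int) - 48) else -1
    rw [if_pos h]
    omega

-- ===== VERDICT (by name: the statement is the Claim_ definition above) =====
theorem biggest_and_pos_spec : Claim_equal_biggest_and_pos := by
  intro line start end_ _ hpre
  unfold Spec_biggest_and_pos biggest_and_pos biggest_and_pos_alt
  by_cases h : start ≥ end_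
  · rw [if_pos h, PySem.List.pyRange_one_eq_nil (by omega)]
    rfl
  · rw [if_neg h]
    push Not at h
    unfold Pre_biggest_and_pos at hpre
    rcases hpre with hle | ⟨h1, h2, hpre⟩
    · omega
    rw [max_eq_left (by omega : -(PySem.Str.len line) ≤ start),
        min_eq_left (by omega : end_ ≤ PySem.Str.len line)] at hpre
    rw [PySem.List.pyRange_one_cons h] at hpre ⊢
    rw [foldA_char]
    have hx : 0 ≤ pyIntAt line start :=
      pyIntAt_nonneg line start (hpre start List.mem_cons_self)
    simp only [List.map_cons, List.foldl_cons]
    have hmax : max (-1 : Int) (pyIntAt line start) = pyIntAt line start := by omega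
    rw [hmax, PySem.List.max?_id_cons]
    have hle : pyIntAt line start ≤
        ((PySem.List.pyRange (start + 1) end_ 1).map (pyIntAt line)).foldl max (pyIntAt line start) :=
      (PySem.List.le_foldl_max _ _).1
    rw [if_pos (by omega : (-1 : Int) <
        ((PySem.List.pyRange (start + 1) end_ 1).map (pyIntAt line)).foldl max (pyIntAt line start))]
    rfl
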